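-- pv_equiv track=rewrite | github.com/NikiBagramov/NIR_ITMO | src/oldrus_anomaly/reporting.py | render_gap
-- ===== SOURCE A (Python) =====
-- from typing import Dict, List, Optional, Sequence
--
-- def render_gap(tokens: Sequence[str], gap_idx: int) -> str:
--     """gap_idx между tokens[gap_idx] и tokens[gap_idx+1]."""
--     if gap_idx < 0 or gap_idx >= len(tokens) - 1:
--         return " ".join(tokens)
--     parts: List[str] = []
--     for i, t in enumerate(tokens):
--         parts.append(t)
--         if i == gap_idx:
--             parts.append("**[?]**")
--     return " ".join(parts)
-- ===== SOURCE B (Python) =====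
-- def render_gap(tokens, gap_idx):
--     if gap_idx < 0 or gap_idx >= len(tokens) - 1:
--         return " ".join(tokens)
--     prefix = tokens[:gap_idx + 1]
--     suffix = tokens[gap_idx + 1:]
--     return " ".join(prefix) + " **[?]** " + " ".join(suffix)
-- ===== Notes on version B (the rewrite author's own statement) =====
-- stated objective: simpler
-- what changed: Replaces the element-by-element enumerate loop that appends the marker after index gap_idx with two slices joined around the marker string.
import Mathlib
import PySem

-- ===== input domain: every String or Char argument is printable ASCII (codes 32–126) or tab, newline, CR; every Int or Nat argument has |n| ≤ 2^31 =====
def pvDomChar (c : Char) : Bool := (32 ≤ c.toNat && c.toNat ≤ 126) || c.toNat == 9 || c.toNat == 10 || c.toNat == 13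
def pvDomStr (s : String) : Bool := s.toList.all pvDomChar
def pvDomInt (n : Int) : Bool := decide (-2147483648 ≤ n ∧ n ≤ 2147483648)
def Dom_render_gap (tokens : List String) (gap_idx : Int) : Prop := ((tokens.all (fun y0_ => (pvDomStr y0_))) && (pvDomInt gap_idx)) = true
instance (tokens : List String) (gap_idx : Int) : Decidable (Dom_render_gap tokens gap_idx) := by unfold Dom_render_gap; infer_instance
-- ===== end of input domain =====

-- B replaces A's enumerate loop (append each token, marker after index gap_idx) by two slices joined around the marker; same return value, simpler decomposition.
-- ===== PORT A =====
def render_gap (tokens : List String) (gap_idx : Int) : String :=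
  if gap_idx < 0 || gap_idx ≥ (tokens.length : Int) - 1 then
    PySem.Str.join " " tokens
  else
    let parts : List String :=
      (PySem.List.enumerate tokens 0).foldl
        (fun acc p =>
          let acc := acc ++ [p.2]
          if p.1 = gap_idx then acc ++ ["**[?]**"] else acc) []
    PySem.Str.join " " parts

-- ===== PORT B =====
-- Python's '+' on strings is ported exactly as concatenation of the code-point lists.
def render_gap_alt (tokens : List String) (gap_idx : Int) : String :=
  if gap_idx < 0 || gap_idx ≥ (tokens.length : Int) - 1 then
    PySem.Str.join " " tokens
  else
    let pre := PySem.List.slice tokens none (some (gap_idx + 1))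
    let suf := PySem.List.slice tokens (some (gap_idx + 1)) none
    String.ofList ((PySem.Str.join " " pre).toList ++ " **[?]** ".toList ++ (PySem.Str.join " " suf).toList)

-- ===== PRECONDITION & SPEC =====
def Spec_render_gap (tokens : List String) (gap_idx : Int) (out : String) : Prop := out = render_gap_alt tokens gap_idx
instance (tokens : List String) (gap_idx : Int) (out : String) : Decidable (Spec_render_gap tokens gap_idx out) := by unfold Spec_render_gap; infer_instance

-- ===== CLAIM (what is proved, stated in full; the proofs are below) =====
def Claim_equal_render_gap : Prop := ∀ (tokens : List String) (gap_idx : Int), Dom_render_gap tokens gap_idx → Spec_render_gap tokens gap_idx (render_gap tokens gap_idx)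

-- ===== LEMMAS AND PROOFS =====

theorem join_append_ne_nil (sep : List Char) (a b : List (List Char)) (ha : a ≠ []) (hb : b ≠ []) :
    PySem.Chars.join sep (a ++ b) = PySem.Chars.join sep a ++ sep ++ PySem.Chars.join sep b := by
  induction a with
  | nil => exact absurd rfl ha
  | cons x xs ih =>
    cases xs with
    | nil =>
      cases b with
      | nil => exact absurd rfl hb
      | cons y ys =>
        simp [PySem.Chars.join_cons_cons, PySem.Chars.join_singleton]
    | cons x2 xs2 =>
      have := ih (by simp)
      simp only [List.cons_append] at this ⊢
      rw [PySem.Chars.join_cons_cons, PySem.Chars.join_cons_cons]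
      rw [this]
      simp [List.append_assoc]

theorem flat_enum (gap : Int) (M : String) (xs : List String) (s : Int)
    (h : ∀ p ∈ PySem.List.enumerate xs s, p.1 ≠ gap) :
    (PySem.List.enumerate xs s).flatMap
      (fun p => if p.1 = gap then [p.2, M] else [p.2]) = xs := by
  induction xs generalizing s with
  | nil => simp [PySem.List.enumerate_nil]
  | cons x xs ih =>
    rw [PySem.List.enumerate_cons]
    simp only [List.flatMap_cons]
    have hx : (s ≠ gap) := h (s, x) (by rw [PySem.List.enumerate_cons]; simp)
    rw [if_neg hx, ih (s + 1) (fun p hp => h p (by rw [PySem.List.enumerate_cons]; simp [hp]))]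
    simp

theorem parts_eq (tokens : List String) (gap_idx : Int) (h0 : 0 ≤ gap_idx)
    (h1 : gap_idx < (tokens.length : Int) - 1) :
    (PySem.List.enumerate tokens 0).foldl
        (fun acc (p : Int × String) =>
          let acc := acc ++ [p.2]
          if p.1 = gap_idx then acc ++ ["**[?]**"] else acc) []
      = tokens.take (gap_idx.toNat + 1) ++ ["**[?]**"] ++ tokens.drop (gap_idx.toNat + 1) := by
  set g := gap_idx.toNat with hgdef
  have hg : gap_idx = (g : Int) := (Int.toNat_of_nonneg h0).symm
  have hlen : g + 1 < tokens.length := by omega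
  have hget : tokens[g]? = some tokens[g] := List.getElem?_eq_getElem (by omega)
  -- rewrite the loop body as an extend, then as a flatMap
  have hfun : (fun (acc : List String) (p : Int × String) =>
        let acc := acc ++ [p.2]
        if p.1 = gap_idx then acc ++ ["**[?]**"] else acc)
      = (fun acc p => acc ++ (if p.1 = gap_idx then [p.2, "**[?]**"] else [p.2])) := by
    funext acc p
    by_cases h : p.1 = gap_idx <;> simp [h]
  rw [hfun, PySem.List.foldl_append_eq_flatMap, List.nil_append]
  -- split tokens into take g ++ [tokens[g]] ++ drop (g+1)
  have hsplit1 : tokens.take (g + 1) = tokens.take g ++ [tokens[g]] := by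
    rw [List.take_add_one, hget]; rfl
  conv_lhs => rw [← List.take_append_drop (g + 1) tokens, hsplit1]
  have hlt : (tokens.take g ++ [tokens[g]]).length = g + 1 := by
    simp [List.length_take]; omega
  rw [List.append_assoc, PySem.List.enumerate_append, List.flatMap_append]
  rw [PySem.List.enumerate_append, List.flatMap_append]
  have hlen_take : (tokens.take g).length = g := by simp [List.length_take]; omega
  have h1' : (PySem.List.enumerate (tokens.take g) 0).flatMap
      (fun p => if p.1 = gap_idx then [p.2, "**[?]**"] else [p.2]) = tokens.take g := by
    apply flat_enum
    intro p hp
    rcases (PySem.List.mem_enumerate_iff _ _ _).mp hp with ⟨k, hk, rfl⟩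
    simp only [hlen_take] at hk
    simp only [hg]
    omega
  have h3' : (PySem.List.enumerate (tokens.drop (g + 1)) ((0 : Int) + ((tokens.take g).length : Int) + (([tokens[g]] : List String).length : Int))).flatMap
      (fun p => if p.1 = gap_idx then [p.2, "**[?]**"] else [p.2]) = tokens.drop (g + 1) := by
    apply flat_enum
    intro p hp
    rcases (PySem.List.mem_enumerate_iff _ _ _).mp hp with ⟨k, hk, rfl⟩
    simp only [hlen_take, List.length_cons, List.length_nil, hg]
    omega
  have h2' : (PySem.List.enumerate ([tokens[g]] : List String) (0 + (tokens.take g).length)).flatMap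
      (fun p => if p.1 = gap_idx then [p.2, "**[?]**"] else [p.2]) = [tokens[g], "**[?]**"] := by
    rw [PySem.List.enumerate_cons, PySem.List.enumerate_nil]
    simp only [List.flatMap_cons, List.flatMap_nil, hlen_take]
    rw [if_pos (show ((0:Int) + ((g:Nat):Int) = gap_idx) from by omega)]
    simp
  rw [h1', h2', h3']
  simp only [List.append_assoc, List.cons_append, List.nil_append, List.singleton_append]
  rw [hsplit1]
  simp only [List.append_assoc, List.singleton_append]

theorem take_ne_nil_of_lt (xs : List String) (n : Nat) (h : 0 < n) (h2 : 0 < xs.length) :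
    xs.take n ≠ [] := by
  apply List.ne_nil_of_length_pos
  simp [List.length_take]; omega

-- ===== VERDICT (by name: the statement is the Claim_ definition above) =====
theorem render_gap_spec : Claim_equal_render_gap := by
  intro tokens gap_idx _
  unfold Spec_render_gap render_gap render_gap_alt
  by_cases hguard : (gap_idx < 0 || gap_idx ≥ (tokens.length : Int) - 1) = true
  · rw [if_pos hguard, if_pos hguard]
  · rw [if_neg hguard, if_neg hguard]
    simp only [Bool.or_eq_true, decide_eq_true_eq, not_or, not_lt] at hguard
    obtain ⟨h0, h1⟩ := hguard
    rw [not_le] at h1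
    set g := gap_idx.toNat with hgdef
    have hg : gap_idx = (g : Int) := (Int.toNat_of_nonneg h0).symm
    have hlen : g + 1 < tokens.length := by omega
    have hslice_to : PySem.List.slice tokens none (some (gap_idx + 1)) = tokens.take (g + 1) := by
      rw [hg, show ((g : Int) + 1) = ((g + 1 : Nat) : Int) by push_cast; ring,
        PySem.List.slice_to_natCast]
    have hslice_from : PySem.List.slice tokens (some (gap_idx + 1)) none = tokens.drop (g + 1) := by
      rw [hg, show ((g : Int) + 1) = ((g + 1 : Nat) : Int) by push_cast; ring,
        PySem.List.slice_from_natCast]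
    rw [hslice_to, hslice_from, parts_eq tokens gap_idx h0 h1]
    apply String.toList_inj.mp
    rw [PySem.Str.toList_join]
    simp only [String.toList_ofList]
    rw [List.append_assoc, List.map_append, List.map_append]
    have hpre : (tokens.take (g + 1)).map String.toList ≠ [] := by
      simp only [ne_eq, List.map_eq_nil_iff]
      exact take_ne_nil_of_lt tokens (g + 1) (by omega) (by omega)
    have hsuf : (tokens.drop (g + 1)).map String.toList ≠ [] := by
      simp only [ne_eq, List.map_eq_nil_iff]
      apply List.ne_nil_of_length_pos
      simp [List.length_drop]; omega
    rw [join_append_ne_nil _ _ _ hpre (by simp)]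
    rw [show (["**[?]**"].map String.toList ++ (tokens.drop (g + 1)).map String.toList)
        = (["**[?]**".toList] : List (List Char)) ++ (tokens.drop (g + 1)).map String.toList from by simp]
    rw [join_append_ne_nil _ _ _ (by simp) hsuf]
    rw [PySem.Chars.join_singleton]
    rw [PySem.Str.toList_join, PySem.Str.toList_join]
    simp [List.append_assoc]
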